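-- pv_equiv track=rewrite | github.com/heltonmaia/proj-question-generator | question_generator/questions_ch5/question_ch5_0044.py | analisar_lista_numerica
-- ===== SOURCE A (Python) =====
-- from typing import List, Tuple
--
-- def analisar_lista_numerica(numeros: List[int]) -> Tuple[int, int, int, int, int]:
--     """
--     Analisa uma lista de números inteiros, retornando sua soma,
--     contagem de pares e ímpares, e os valores mínimo e máximo.
--
--     Args:
--         numeros (list[int]): Uma lista de números inteiros não vazia.
--
--     Returns:
--         tuple[int, int, int, int, int]: Uma tupla contendo:
--             - A soma de todos os números.
--             - A quantidade de números pares.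
--             - A quantidade de números ímpares.
--             - O menor valor da lista.
--             - O maior valor da lista.
--     """
--     soma_total = sum(numeros)
--     pares = 0
--     impares = 0
--
--     for num in numeros:
--         if num % 2 == 0:
--             pares += 1
--         else:
--             impares += 1
--
--     menor_valor = min(numeros)
--     maior_valor = max(numeros)
--
--     return soma_total, pares, impares, menor_valor, maior_valor
-- ===== SOURCE B (Python) =====
-- def analisar_lista_numerica(numeros):
--     if not numeros:
--         raise ValueError("analisar_lista_numerica: lista vazia")
--     it = iter(numeros)
--     primeiro = next(it)
--     soma_total = primeiro
--     pares = 1 if primeiro % 2 == 0 else 0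
--     impares = 1 - pares
--     menor_valor = primeiro
--     maior_valor = primeiro
--     for n in it:
--         soma_total += n
--         if n % 2 == 0:
--             pares += 1
--         else:
--             impares += 1
--         menor_valor = min(menor_valor, n)
--         maior_valor = max(maior_valor, n)
--     return soma_total, pares, impares, menor_valor, maior_valor
-- ===== Notes on version B (the rewrite author's own statement) =====
-- stated objective: alternative
-- what changed: A makes four separate passes (sum, parity-count loop, min, max); B makes a single pass maintaining all five accumulators, initialized from the first element after an explicit non-empty check.
import Mathlib
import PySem

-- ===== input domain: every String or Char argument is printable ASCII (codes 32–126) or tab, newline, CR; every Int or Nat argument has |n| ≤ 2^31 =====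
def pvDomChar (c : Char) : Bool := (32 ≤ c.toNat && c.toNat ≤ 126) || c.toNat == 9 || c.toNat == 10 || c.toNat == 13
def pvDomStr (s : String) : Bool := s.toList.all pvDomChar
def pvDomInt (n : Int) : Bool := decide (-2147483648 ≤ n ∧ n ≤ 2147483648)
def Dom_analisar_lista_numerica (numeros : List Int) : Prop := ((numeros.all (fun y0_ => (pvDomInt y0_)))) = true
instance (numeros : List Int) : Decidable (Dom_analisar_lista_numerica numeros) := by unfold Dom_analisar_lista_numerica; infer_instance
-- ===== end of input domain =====

-- B replaces A's four separate traversals (sum, parity loop, min, max) by one single-pass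
-- loop maintaining all five accumulators; equivalent on all non-empty lists (objective: alternative).


-- ===== PORT A =====
-- sum → foldl (+) 0; the parity loop is a fold over (pares, impares);
-- min(numeros)/max(numeros) → PySem.List.min?/max? (none = ValueError, excluded by Pre_;
-- the .getD 0 default is never reached inside Pre_).
def analisar_lista_numerica (numeros : List Int) : Int × Int × Int × Int × Int :=
  let soma_total := numeros.foldl (· + ·) 0
  let pi := numeros.foldl
    (fun (pi : Int × Int) num =>
      if PySem.Int.mod num 2 = 0 then (pi.1 + 1, pi.2) else (pi.1, pi.2 + 1)) (0, 0)
  let menor_valor := (PySem.List.min? numeros (fun x => x)).getD 0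
  let maior_valor := (PySem.List.max? numeros (fun x => x)).getD 0
  (soma_total, pi.1, pi.2, menor_valor, maior_valor)

-- ===== PORT B =====
-- B's single loop over the tail, all five accumulators in one state, seeded from the
-- first element.  On [] the Python B raises ValueError (outside Pre_); the port
-- returns (0,0,0,0,0) there.
def analisar_lista_numerica_alt (numeros : List Int) : Int × Int × Int × Int × Int :=
  match numeros with
  | [] => (0, 0, 0, 0, 0)
  | primeiro :: resto =>
    let pares0 : Int := if PySem.Int.mod primeiro 2 = 0 then 1 else 0
    resto.foldl
      (fun (st : Int × Int × Int × Int × Int) n =>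
        let (soma, pares, impares, menor, maior) := st
        if PySem.Int.mod n 2 = 0 then
          (soma + n, pares + 1, impares, min menor n, max maior n)
        else
          (soma + n, pares, impares + 1, min menor n, max maior n))
      (primeiro, pares0, 1 - pares0, primeiro, primeiro)

-- ===== PRECONDITION & SPEC =====
-- Pre_ excludes only the empty list, on which A raises ValueError (min of empty sequence).
def Pre_analisar_lista_numerica (numeros : List Int) : Prop := numeros ≠ []
instance (numeros : List Int) : Decidable (Pre_analisar_lista_numerica numeros) := by
  unfold Pre_analisar_lista_numerica; infer_instance
def pvWitness_analisar_lista_numerica : List Int := [3, -2, 7, 0]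

def Spec_analisar_lista_numerica (numeros : List Int) (out : Int × Int × Int × Int × Int) : Prop := out = analisar_lista_numerica_alt numeros
instance (numeros : List Int) (out : Int × Int × Int × Int × Int) : Decidable (Spec_analisar_lista_numerica numeros out) := by unfold Spec_analisar_lista_numerica; infer_instance

-- ===== CLAIM (what is proved, stated in full; the proofs are below) =====
def Claim_equal_analisar_lista_numerica : Prop := ∀ (numeros : List Int), Dom_analisar_lista_numerica numeros → Pre_analisar_lista_numerica numeros → Spec_analisar_lista_numerica numeros (analisar_lista_numerica numeros)

-- ===== LEMMAS AND PROOFS =====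

-- B's single fold over the tail computes the four independent folds of A's quantities.
theorem altFold_eq (t : List Int) (s p i mn mx : Int) :
    t.foldl
      (fun (st : Int × Int × Int × Int × Int) n =>
        let (soma, pares, impares, menor, maior) := st
        if PySem.Int.mod n 2 = 0 then
          (soma + n, pares + 1, impares, min menor n, max maior n)
        else
          (soma + n, pares, impares + 1, min menor n, max maior n))
      (s, p, i, mn, mx)
    = (t.foldl (· + ·) s,
       (t.foldl (fun (pi : Int × Int) num =>
          if PySem.Int.mod num 2 = 0 then (pi.1 + 1, pi.2) else (pi.1, pi.2 + 1)) (p, i)).1,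
       (t.foldl (fun (pi : Int × Int) num =>
          if PySem.Int.mod num 2 = 0 then (pi.1 + 1, pi.2) else (pi.1, pi.2 + 1)) (p, i)).2,
       t.foldl min mn, t.foldl max mx) := by
  induction t generalizing s p i mn mx with
  | nil => simp [List.foldl]
  | cons x t ih =>
    by_cases hp : PySem.Int.mod x 2 = 0
    · simp only [List.foldl_cons, if_pos hp]
      rw [ih]
    · simp only [List.foldl_cons, if_neg hp]
      rw [ih]

-- the parity fold's initial state can be shifted off: starting at (p,i) adds (p,i) componentwise
theorem parFold_shift (t : List Int) (p i : Int) :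
    t.foldl (fun (pi : Int × Int) num =>
        if PySem.Int.mod num 2 = 0 then (pi.1 + 1, pi.2) else (pi.1, pi.2 + 1)) (p, i)
    = (p + (t.foldl (fun (pi : Int × Int) num =>
        if PySem.Int.mod num 2 = 0 then (pi.1 + 1, pi.2) else (pi.1, pi.2 + 1)) (0, 0)).1,
       i + (t.foldl (fun (pi : Int × Int) num =>
        if PySem.Int.mod num 2 = 0 then (pi.1 + 1, pi.2) else (pi.1, pi.2 + 1)) (0, 0)).2) := by
  induction t generalizing p i with
  | nil => simp [List.foldl]
  | cons x t ih =>
    by_cases hp : PySem.Int.mod x 2 = 0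
    · simp only [List.foldl_cons, if_pos hp]
      rw [ih (p + 1) i, ih ((0:Int) + 1) 0]
      simp only [Prod.mk.injEq]
      omega
    · simp only [List.foldl_cons, if_neg hp]
      rw [ih p (i + 1), ih 0 ((0:Int) + 1)]
      simp only [Prod.mk.injEq]
      omega

theorem analisar_lista_numerica_spec : Claim_equal_analisar_lista_numerica := by
  intro numeros _ hpre
  unfold Spec_analisar_lista_numerica
  match numeros with
  | [] => exact absurd rfl hpre
  | h :: t =>
    simp only [analisar_lista_numerica, analisar_lista_numerica_alt, altFold_eq,
               PySem.List.min?_id_cons, PySem.List.max?_id_cons, Option.getD_some,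
               List.foldl_cons]
    by_cases hp : PySem.Int.mod h 2 = 0
    · simp only [if_pos hp]
      rw [parFold_shift t ((0:Int) + 1) 0, parFold_shift t 1 (1 - 1)]
      simp only [Prod.mk.injEq, zero_add]
      exact ⟨trivial, trivial, by ring, trivial⟩
    · simp only [if_neg hp]
      rw [parFold_shift t 0 ((0:Int) + 1), parFold_shift t 0 (1 - 0)]
      simp only [Prod.mk.injEq, zero_add]
      exact ⟨trivial, trivial, by ring, trivial⟩
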